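-- pv_equiv track=rewrite | github.com/camrdale/advent-of-code | year2024/day7/part1.py | find_equation
-- ===== SOURCE A (Python) =====
-- def find_equation(
--         test_value: int,
--         current_value: int,
--         equation: str,
--         remaining_operands: list[int]
--         ) -> str | None:
--     """Find an equation that gives the test value."""
--     if len(remaining_operands) == 0:
--         # All operands have been considered.
--         if current_value == test_value:
--             return equation
--         return None
--     if current_value > test_value:
--         # Short circuit, return early if the value is not possible.
--         return None
--     operand = remaining_operands[0]
--     result = find_equation(
--         test_value,
--         current_value + operand,
--         equation + ' + ' + str(operand),
--         remaining_operands[1:])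
--     if result is not None:
--         return result
--     return find_equation(
--         test_value,
--         current_value * operand,
--         equation + ' * ' + str(operand),
--         remaining_operands[1:])
-- ===== SOURCE B (Python) =====
-- def find_equation(
--         test_value: int,
--         current_value: int,
--         equation: str,
--         remaining_operands: list[int]
--         ) -> str | None:
--     """Find an equation that gives the test value (iterative DFS with explicit stack)."""
--     ops = remaining_operands
--     n = len(ops)
--     stack = [(current_value, 0, equation)]
--     while stack:
--         value, i, eq = stack.pop()
--         if i == n:
--             if value == test_value:
--                 return eq
--             continue
--         if value > test_value:
--             continue
--         op = ops[i]
--         # push '*' first so the '+' branch is popped (explored) first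
--         stack.append((value * op, i + 1, eq + ' * ' + str(op)))
--         stack.append((value + op, i + 1, eq + ' + ' + str(op)))
--     return None
-- ===== Notes on version B (the rewrite author's own statement) =====
-- stated objective: alternative
-- what changed: Replaces A's binary recursion (try '+', then '*' on the tail slice) by an iterative depth-first search over an explicit stack of (value, operand-index, equation) states, pushing the '*' branch before the '+' branch so the pop order reproduces A's traversal order exactly.
import Mathlib
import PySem

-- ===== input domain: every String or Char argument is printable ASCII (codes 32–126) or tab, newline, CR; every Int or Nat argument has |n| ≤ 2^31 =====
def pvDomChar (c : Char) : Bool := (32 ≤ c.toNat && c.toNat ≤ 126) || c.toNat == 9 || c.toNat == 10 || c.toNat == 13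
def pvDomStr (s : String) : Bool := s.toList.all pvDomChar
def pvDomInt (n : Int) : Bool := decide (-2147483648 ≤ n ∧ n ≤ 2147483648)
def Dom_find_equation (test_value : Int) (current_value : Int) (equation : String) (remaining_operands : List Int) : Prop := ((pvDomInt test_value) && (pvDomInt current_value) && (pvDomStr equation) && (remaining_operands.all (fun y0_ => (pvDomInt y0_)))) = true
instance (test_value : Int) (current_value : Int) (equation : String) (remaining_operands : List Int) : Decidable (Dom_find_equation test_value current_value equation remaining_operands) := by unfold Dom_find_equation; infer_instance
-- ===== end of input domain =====

-- B replaces A's recursion by an iterative depth-first search over an explicit stack of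
-- (value, operand-index, equation) states, exploring the '+' branch first: same results, alternative decomposition.

-- ===== PORT A =====
def find_equation (test_value : Int) (current_value : Int) (equation : String) (remaining_operands : List Int) : Option String :=
  match remaining_operands with
  | [] =>
    if current_value = test_value then some equation else none
  | operand :: rest =>
    if current_value > test_value then none
    else
      match find_equation test_value (current_value + operand)
              (equation ++ " + " ++ PySem.Int.toStr operand) rest with
      | some result => some result
      | none =>
        find_equation test_value (current_value * operand)
          (equation ++ " * " ++ PySem.Int.toStr operand) rest

-- ===== PORT B =====
-- weight of the stack, used only as the termination measure of the while loop
def feAltMeasure (n : Nat) (stack : List (Int × Nat × String)) : Nat :=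
  stack.foldr (fun e acc => 3 ^ (n - e.2.1) + acc) 0

-- the while loop of Source B; the head of the list is the top of the stack
def feAltLoop (test_value : Int) (ops : List Int) (n : Nat)
    (stack : List (Int × Nat × String)) : Option String :=
  match stack with
  | [] => none
  | (value, i, eq) :: rest =>
    if i = n then
      if value = test_value then some eq else feAltLoop test_value ops n rest
    else if value > test_value then
      feAltLoop test_value ops n rest
    else
      match h : ops[i]? with
      | none => feAltLoop test_value ops n rest   -- unreachable from the seed state (i < n there)
      | some op =>
        feAltLoop test_value ops n
          ((value + op, i + 1, eq ++ " + " ++ PySem.Int.toStr op) ::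
           (value * op, i + 1, eq ++ " * " ++ PySem.Int.toStr op) :: rest)
termination_by feAltMeasure ops.length stack
decreasing_by
  · simp [feAltMeasure]
  · simp [feAltMeasure]
  · simp [feAltMeasure]
  · have hi : i < ops.length := (List.getElem?_eq_some_iff.mp h).1
    simp only [feAltMeasure, List.foldr_cons]
    have e1 : ops.length - i = (ops.length - (i+1)) + 1 := by omega
    have e2 : 0 < 3 ^ (ops.length - (i+1)) := pow_pos (by norm_num) _
    rw [e1, pow_succ]; omega

def find_equation_alt (test_value : Int) (current_value : Int) (equation : String) (remaining_operands : List Int) : Option String :=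
  feAltLoop test_value remaining_operands remaining_operands.length
    [(current_value, 0, equation)]

-- ===== PRECONDITION & SPEC =====
def Spec_find_equation (test_value : Int) (current_value : Int) (equation : String) (remaining_operands : List Int) (out : Option String) : Prop := out = find_equation_alt test_value current_value equation remaining_operands
instance (test_value : Int) (current_value : Int) (equation : String) (remaining_operands : List Int) (out : Option String) : Decidable (Spec_find_equation test_value current_value equation remaining_operands out) := by unfold Spec_find_equation; infer_instance

-- ===== CLAIM (what is proved, stated in full; the proofs are below) =====
def Claim_equal_find_equation : Prop := ∀ (test_value : Int) (current_value : Int) (equation : String) (remaining_operands : List Int), Dom_find_equation test_value current_value equation remaining_operands → Spec_find_equation test_value current_value equation remaining_operands (find_equation test_value current_value equation remaining_operands)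

-- ===== LEMMAS AND PROOFS =====

-- first non-none element of a list of options, in order
def feFirst : List (Option String) → Option String
  | [] => none
  | some r :: _ => some r
  | none :: xs => feFirst xs

-- what a stack entry will eventually produce: A's recursion on the remaining suffix of operands
def feResolve (test_value : Int) (ops : List Int) (e : Int × Nat × String) : Option String :=
  find_equation test_value e.1 e.2.2 (ops.drop e.2.1)

-- loop invariant: the loop returns the first resolvable entry of the stack, in pop order
theorem feAltLoop_eq_first (test_value : Int) (ops : List Int)
    (stack : List (Int × Nat × String))
    (hinv : ∀ e ∈ stack, e.2.1 ≤ ops.length) :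
    feAltLoop test_value ops ops.length stack
      = feFirst (stack.map (feResolve test_value ops)) := by
  induction stack using feAltLoop.induct test_value ops ops.length with
  | case1 => simp [feAltLoop, feFirst]
  | case2 eq rest =>
    rw [feAltLoop]
    simp only [if_pos rfl]
    simp [feResolve, find_equation, List.drop_length, feFirst]
  | case3 value eq rest hv ih =>
    rw [feAltLoop]
    simp only [if_pos rfl, if_neg hv]
    rw [ih (fun e he => hinv e (List.mem_cons_of_mem _ he))]
    simp [feResolve, find_equation, List.drop_length, feFirst, hv]
  | case4 value i eq rest hi hv ih =>
    have hile : i ≤ ops.length := by have := hinv (value, i, eq) (by simp); simpa using this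
    have hilt : i < ops.length := lt_of_le_of_ne hile hi
    have hdrop : ops.drop i = ops[i] :: ops.drop (i + 1) := List.drop_eq_getElem_cons hilt
    rw [feAltLoop]
    simp only [if_neg hi, if_pos hv]
    rw [ih (fun e he => hinv e (List.mem_cons_of_mem _ he))]
    simp only [List.map_cons, feResolve, hdrop]
    rw [show find_equation test_value value eq (ops[i] :: ops.drop (i+1)) = none by
      rw [find_equation]; simp [hv]]
    simp [feFirst]
  | case5 value i eq rest hi hv hop ih =>
    exfalso
    have hile : i ≤ ops.length := by have := hinv (value, i, eq) (by simp); simpa using this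
    have hilt : i < ops.length := lt_of_le_of_ne hile hi
    simp [List.getElem?_eq_getElem hilt] at hop
  | case6 value i eq rest hi hv op hop ih =>
    have hile : i ≤ ops.length := by have := hinv (value, i, eq) (by simp); simpa using this
    have hilt : i < ops.length := lt_of_le_of_ne hile hi
    have hopv : ops[i] = op := (List.getElem?_eq_some_iff.mp hop).2
    have hdrop : ops.drop i = op :: ops.drop (i + 1) := by
      rw [List.drop_eq_getElem_cons hilt, hopv]
    have hinv' : ∀ e ∈ ((value + op, i + 1, eq ++ " + " ++ PySem.Int.toStr op) ::
        (value * op, i + 1, eq ++ " * " ++ PySem.Int.toStr op) :: rest), e.2.1 ≤ ops.length := by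
      intro e he
      rcases List.mem_cons.mp he with he | he
      · subst he; simpa using hilt
      · rcases List.mem_cons.mp he with he | he
        · subst he; simpa using hilt
        · exact hinv e (List.mem_cons_of_mem _ he)
    rw [feAltLoop]
    simp only [if_neg hi, if_neg hv]
    split
    next heq => rw [heq] at hop; cases hop
    next op' heq =>
      rw [heq] at hop
      injection hop with hop'
      subst hop'
      rw [ih hinv']
      simp only [List.map_cons, feResolve, hdrop]
      rw [show find_equation test_value value eq (op' :: ops.drop (i+1)) =
          (match find_equation test_value (value + op') (eq ++ " + " ++ PySem.Int.toStr op') (ops.drop (i+1)) with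
           | some r => some r
           | none => find_equation test_value (value * op') (eq ++ " * " ++ PySem.Int.toStr op') (ops.drop (i+1))) by
        rw [find_equation]; simp [hv]]
      cases find_equation test_value (value + op') (eq ++ " + " ++ PySem.Int.toStr op') (ops.drop (i+1)) with
      | none => simp [feFirst]
      | some r => simp [feFirst]

-- ===== VERDICT (by name: the statement is the Claim_ definition above) =====
theorem find_equation_spec : Claim_equal_find_equation := by
  intro test_value current_value equation remaining_operands _
  unfold Spec_find_equation find_equation_alt
  rw [feAltLoop_eq_first test_value remaining_operands _ (by intro e he; simp at he; simp [he])]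
  simp [feFirst, feResolve]
  cases h : find_equation test_value current_value equation remaining_operands with
  | none => simp [feFirst]
  | some r => simp [feFirst]
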